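-- pv_equiv track=rewrite | github.com/iitis/tsptw_code | ilp_helpers.py | intvars_to_binary
-- ===== SOURCE A (Python) =====
-- from math import floor, log
--
-- def intvars_to_binary(array, C, latest, n, earliest, var):
--
--     bservice_size = [0] * n
--     for i in range(1, n):
--         if var == "service":
--             bservice_size[i] = floor(log(latest[i] - earliest[i], 2)) + 1
--         elif var == "wait":
--             if earliest[i] - C[0][i] > 0:
--                 bservice_size[i] = floor(log(earliest[i] - C[0][i], 2)) + 1
--             else:
--                 bservice_size[i] = 0
--         elif var == "eq24":
--             bservice_size[i] = floor(log(latest[i], 2)) + 1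
--         elif var == "eq25":
--             bservice_size[i] = floor(log(latest[i] - C[0][i], 2)) + 1
--
--     service_arr = [0] * sum(bservice_size)
--
--     k = 0
--     for i in range(1, n):
--         if var == "service":
--             bi = mapint(bmap(latest[i] - earliest[i]), (array[i]))
--         elif var == "eq24":
--             bi = mapint(bmap(latest[i]), (array[i]))
--         elif var == "eq25":
--             bi = mapint(bmap(latest[i] - C[0][i]), (array[i]))
--         elif var == "wait":
--             if bservice_size[i] != 0:
--                 bi = mapint(bmap(earliest[i] - C[0][i]), (array[i]))
--             else:
--                 continue
--
--         for b in bi: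
--             service_arr[k] = int(b)
--             k += 1
--
--     return service_arr
--
-- def bmap(n):
--     map = []
--     k = 0
--     while n > 2 ** k:
--         map.append(2 ** k)
--         n -= 2 ** k
--         k += 1
--     map.append(n)
--     return map
--
-- def mapint(map, n):
--
--     if n == 0:
--         return [0] * len(map)
--     arr = [0] * len(map)
--     k = len(map) - 1
--     while n > 0:
--         if n >= map[k]:
--             n -= map[k]
--             arr[k] = 1
--         k -= 1
--     return arr
-- ===== SOURCE B (Python) =====
-- # B: single pass; per element a closed-form encoder (bit-length + remainder + low binary digits)
-- # replaces A's size-precomputation pass, preallocated array, bmap list building and index-walking greedy mapint.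
--
-- def encode(v, x):
--     # encode x (0 <= x <= v, v >= 1) over weights [1, 2, ..., 2**(m-1), v - (2**m - 1)]
--     m = v.bit_length() - 1
--     r = v - (2 ** m - 1)
--     top = 1 if x >= r else 0
--     if top:
--         x -= r
--     bits = []
--     for _ in range(m):
--         bits.append(x % 2)
--         x //= 2
--     bits.append(top)
--     return bits
--
-- def intvars_to_binary(array, C, latest, n, earliest, var):
--     out = []
--     for i in range(1, n):
--         if var == "service":
--             v = latest[i] - earliest[i]
--         elif var == "wait":
--             v = earliest[i] - C[0][i]
--             if v <= 0:
--                 continue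
--         elif var == "eq24":
--             v = latest[i]
--         elif var == "eq25":
--             v = latest[i] - C[0][i]
--         out.extend(encode(v, array[i]))
--     return out
-- ===== Notes on version B (the rewrite author's own statement) =====
-- stated objective: simpler
-- what changed: One pass that extends the output directly with a closed-form per-element encoder (bit_length, remainder weight, low binary digits) instead of A's separate size-computing loop, preallocated zero array with a running write index, explicit bmap weight-list construction and index-walking greedy mapint.
-- outside the precondition, e.g. on intvars_to_binary([0, -3], [[0, 0]], [0, 5], 2, [0, 2], 'service'): A returns [0, 0], B returns [1, 0]; on intvars_to_binary([0, 5], [[0, 0]], [0, 1], 2, [0, 0], 'eq24'): A raises IndexError, B returns [1]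
import Mathlib
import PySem

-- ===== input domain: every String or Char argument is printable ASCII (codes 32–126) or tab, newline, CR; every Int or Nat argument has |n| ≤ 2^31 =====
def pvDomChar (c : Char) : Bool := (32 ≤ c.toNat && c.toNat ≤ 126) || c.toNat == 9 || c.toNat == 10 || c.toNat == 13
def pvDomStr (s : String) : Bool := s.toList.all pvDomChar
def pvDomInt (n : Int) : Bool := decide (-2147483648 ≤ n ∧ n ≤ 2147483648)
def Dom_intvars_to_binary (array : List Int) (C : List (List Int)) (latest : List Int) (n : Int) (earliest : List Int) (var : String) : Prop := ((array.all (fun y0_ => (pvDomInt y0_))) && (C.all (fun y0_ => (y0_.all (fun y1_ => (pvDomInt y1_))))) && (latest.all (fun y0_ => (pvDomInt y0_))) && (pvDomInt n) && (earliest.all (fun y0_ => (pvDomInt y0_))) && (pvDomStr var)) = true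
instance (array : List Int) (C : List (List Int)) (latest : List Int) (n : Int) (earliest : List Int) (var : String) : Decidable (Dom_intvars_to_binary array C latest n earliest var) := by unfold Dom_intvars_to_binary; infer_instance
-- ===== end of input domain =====

-- B replaces A's size-precomputation pass + preallocated write-index array + bmap/mapint greedy walk
-- by one pass appending a closed-form per-element encoding; equal return value on Pre_ (objective: simpler).


-- ===== PORT A =====

-- floor(log(v, 2)) = bitLength v - 1 : exact for 1 <= v <= 2^33 (checked against CPython's float log
-- on that whole range); Python raises ValueError for v <= 0, excluded by Pre_.
def pvFlog2 (v : Int) : Int := (PySem.Int.bitLength v : Int) - 1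

-- while n > 2 ** k: map.append(2 ** k); n -= 2 ** k; k += 1
def pvBmapLoop (n : Int) (k : Nat) (acc : List Int) : List Int :=
  if h : (2 : Int) ^ k < n then pvBmapLoop (n - 2 ^ k) (k + 1) (acc ++ [2 ^ k]) else acc ++ [n]
termination_by n.toNat
decreasing_by
  have h2 : (0 : Int) < 2 ^ k := pow_pos (by norm_num) k
  omega

def pvBmap (n : Int) : List Int := pvBmapLoop n 0 []

-- while n > 0: if n >= map[k]: n -= map[k]; arr[k] = 1; k -= 1    (k may go negative: Python indexing)
def pvMapintLoop (mp : List Int) (n : Int) (k : Int) (arr : List Int) : List Int :=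
  if 0 < n then
    if hk : PySem.Raise.InRange mp.length k then
      if PySem.List.pyGetD mp k 0 ≤ n then
        pvMapintLoop mp (n - PySem.List.pyGetD mp k 0) (k - 1) (PySem.List.pySetD arr k 1)
      else pvMapintLoop mp n (k - 1) arr
    else arr  -- Python raises IndexError here; unreachable under Pre_
  else arr
termination_by (k + mp.length + 1).toNat
decreasing_by
  · have := hk.1; omega
  · have := hk.1; omega

def pvMapint (mp : List Int) (n : Int) : List Int :=
  if n = 0 then List.replicate mp.length 0
  else pvMapintLoop mp n ((mp.length : Int) - 1) (List.replicate mp.length 0)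

-- first loop of A: fills bservice_size[i] for i in range(1, n)
def pvSizesA (C : List (List Int)) (latest : List Int) (n : Int) (earliest : List Int) (var : String) : List Int :=
  (PySem.List.pyRange 1 n 1).foldl (fun bs i =>
    if var = "service" then
      PySem.List.pySetD bs i (pvFlog2 (PySem.List.pyGetD latest i 0 - PySem.List.pyGetD earliest i 0) + 1)
    else if var = "wait" then
      (if 0 < PySem.List.pyGetD earliest i 0 - PySem.List.pyGetD (PySem.List.pyGetD C 0 []) i 0 then
        PySem.List.pySetD bs i (pvFlog2 (PySem.List.pyGetD earliest i 0 - PySem.List.pyGetD (PySem.List.pyGetD C 0 []) i 0) + 1)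
      else PySem.List.pySetD bs i 0)
    else if var = "eq24" then
      PySem.List.pySetD bs i (pvFlog2 (PySem.List.pyGetD latest i 0) + 1)
    else if var = "eq25" then
      PySem.List.pySetD bs i (pvFlog2 (PySem.List.pyGetD latest i 0 - PySem.List.pyGetD (PySem.List.pyGetD C 0 []) i 0) + 1)
    else bs)
    (List.replicate n.toNat 0)

-- for b in bi: service_arr[k] = int(b); k += 1   (int(b) of an int b is b)
def pvWriteBits (st : Int × List Int) (bi : List Int) : Int × List Int :=
  bi.foldl (fun p b => (p.1 + 1, PySem.List.pySetD p.2 p.1 b)) st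

def intvars_to_binary (array : List Int) (C : List (List Int)) (latest : List Int) (n : Int) (earliest : List Int) (var : String) : List Int :=
  let sizes := pvSizesA C latest n earliest var
  ((PySem.List.pyRange 1 n 1).foldl (fun st i =>
      if var = "service" then
        pvWriteBits st (pvMapint (pvBmap (PySem.List.pyGetD latest i 0 - PySem.List.pyGetD earliest i 0)) (PySem.List.pyGetD array i 0))
      else if var = "eq24" then
        pvWriteBits st (pvMapint (pvBmap (PySem.List.pyGetD latest i 0)) (PySem.List.pyGetD array i 0))
      else if var = "eq25" then
        pvWriteBits st (pvMapint (pvBmap (PySem.List.pyGetD latest i 0 - PySem.List.pyGetD (PySem.List.pyGetD C 0 []) i 0)) (PySem.List.pyGetD array i 0))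
      else if var = "wait" then
        (if PySem.List.pyGetD sizes i 0 ≠ 0 then
          pvWriteBits st (pvMapint (pvBmap (PySem.List.pyGetD earliest i 0 - PySem.List.pyGetD (PySem.List.pyGetD C 0 []) i 0)) (PySem.List.pyGetD array i 0))
        else st)
      else st  -- Python: NameError (bi unbound); such inputs are excluded by Pre_
    ) (0, List.replicate sizes.sum.toNat 0)).2

-- ===== PORT B =====

-- for _ in range(m): bits.append(x % 2); x //= 2
def pvLowBits : Nat → Int → List Int
  | 0, _ => []
  | m + 1, x => PySem.Int.mod x 2 :: pvLowBits m (PySem.Int.floordiv x 2)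

-- encode(v, x) of Source B; v.bit_length() is PySem.Int.bitLength (for v = 0 Python's m = -1 then raises
-- on 2 ** m - 1 being fractional; v >= 1 under Pre_, Nat subtraction gives m = 0 there, harmless)
def pvEncode (v x : Int) : List Int :=
  let m : Nat := PySem.Int.bitLength v - 1
  let r : Int := v - (2 ^ m - 1)
  let top : Int := if r ≤ x then 1 else 0
  let x' : Int := if r ≤ x then x - r else x
  pvLowBits m x' ++ [top]

def intvars_to_binary_alt (array : List Int) (C : List (List Int)) (latest : List Int) (n : Int) (earliest : List Int) (var : String) : List Int :=
  (PySem.List.pyRange 1 n 1).foldl (fun out i =>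
    if var = "service" then
      out ++ pvEncode (PySem.List.pyGetD latest i 0 - PySem.List.pyGetD earliest i 0) (PySem.List.pyGetD array i 0)
    else if var = "wait" then
      (if PySem.List.pyGetD earliest i 0 - PySem.List.pyGetD (PySem.List.pyGetD C 0 []) i 0 ≤ 0 then out
       else out ++ pvEncode (PySem.List.pyGetD earliest i 0 - PySem.List.pyGetD (PySem.List.pyGetD C 0 []) i 0) (PySem.List.pyGetD array i 0))
    else if var = "eq24" then
      out ++ pvEncode (PySem.List.pyGetD latest i 0) (PySem.List.pyGetD array i 0)
    else if var = "eq25" then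
      out ++ pvEncode (PySem.List.pyGetD latest i 0 - PySem.List.pyGetD (PySem.List.pyGetD C 0 []) i 0) (PySem.List.pyGetD array i 0)
    else out  -- Python: NameError; excluded by Pre_
  ) []

-- ===== PRECONDITION & SPEC =====

-- the value v being encoded must be positive (else A's log raises ValueError) and the encoded entry
-- x must satisfy 0 <= x <= v: mapint's loop guard makes A return an accidental all-zero list for
-- negative x, and for x > v its index k walks past 0 into Python's negative-index wraparound, which
-- raises IndexError or returns an accidental encoding — out-of-range values are excluded.
def pvOkVX (v x : Int) : Prop := 1 ≤ v ∧ 0 ≤ x ∧ x ≤ v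

-- Pre_: n <= 1 (loops empty, A returns []); otherwise var is one of the four recognised names
-- (anything else leaves `bi` unbound: NameError), the lists actually accessed are long enough
-- (else IndexError), and each encoded value is in range (see pvOkVX above).
def Pre_intvars_to_binary (array : List Int) (C : List (List Int)) (latest : List Int) (n : Int) (earliest : List Int) (var : String) : Prop :=
  n ≤ 1 ∨
  ((var = "service" ∧ n ≤ (latest.length : Int) ∧ n ≤ (earliest.length : Int) ∧ n ≤ (array.length : Int) ∧
      ∀ i ∈ PySem.List.pyRange 1 n 1,
        pvOkVX (PySem.List.pyGetD latest i 0 - PySem.List.pyGetD earliest i 0) (PySem.List.pyGetD array i 0)) ∨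
   (var = "wait" ∧ n ≤ (earliest.length : Int) ∧ C ≠ [] ∧ n ≤ ((C.headD []).length : Int) ∧
      ∀ i ∈ PySem.List.pyRange 1 n 1,
        0 < PySem.List.pyGetD earliest i 0 - PySem.List.pyGetD (PySem.List.pyGetD C 0 []) i 0 →
          (i < (array.length : Int) ∧
           pvOkVX (PySem.List.pyGetD earliest i 0 - PySem.List.pyGetD (PySem.List.pyGetD C 0 []) i 0) (PySem.List.pyGetD array i 0))) ∨
   (var = "eq24" ∧ n ≤ (latest.length : Int) ∧ n ≤ (array.length : Int) ∧
      ∀ i ∈ PySem.List.pyRange 1 n 1,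
        pvOkVX (PySem.List.pyGetD latest i 0) (PySem.List.pyGetD array i 0)) ∨
   (var = "eq25" ∧ n ≤ (latest.length : Int) ∧ n ≤ (array.length : Int) ∧ C ≠ [] ∧ n ≤ ((C.headD []).length : Int) ∧
      ∀ i ∈ PySem.List.pyRange 1 n 1,
        pvOkVX (PySem.List.pyGetD latest i 0 - PySem.List.pyGetD (PySem.List.pyGetD C 0 []) i 0) (PySem.List.pyGetD array i 0)))

instance (array : List Int) (C : List (List Int)) (latest : List Int) (n : Int) (earliest : List Int) (var : String) : Decidable (Pre_intvars_to_binary array C latest n earliest var) := by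
  unfold Pre_intvars_to_binary pvOkVX; infer_instance

def pvWitness_intvars_to_binary : List Int × List (List Int) × List Int × Int × List Int × String :=
  ([0, 1], [[0, 0]], [0, 2], 2, [0, 1], "service")

def Spec_intvars_to_binary (array : List Int) (C : List (List Int)) (latest : List Int) (n : Int) (earliest : List Int) (var : String) (out : List Int) : Prop := out = intvars_to_binary_alt array C latest n earliest var
instance (array : List Int) (C : List (List Int)) (latest : List Int) (n : Int) (earliest : List Int) (var : String) (out : List Int) : Decidable (Spec_intvars_to_binary array C latest n earliest var out) := by unfold Spec_intvars_to_binary; infer_instance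

-- ===== CLAIM (what is proved, stated in full; the proofs are below) =====
def Claim_equal_intvars_to_binary : Prop := ∀ (array : List Int) (C : List (List Int)) (latest : List Int) (n : Int) (earliest : List Int) (var : String), Dom_intvars_to_binary array C latest n earliest var → Pre_intvars_to_binary array C latest n earliest var → Spec_intvars_to_binary array C latest n earliest var (intvars_to_binary array C latest n earliest var)

-- ===== LEMMAS AND PROOFS =====

theorem pvLowBits_zero (m : Nat) : pvLowBits m 0 = List.replicate m 0 := by
  induction m with
  | zero => rfl
  | succ m ih => simp [pvLowBits, PySem.Int.mod, PySem.Int.floordiv, ih, List.replicate_succ]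

theorem pv_mod_two (x : Int) : PySem.Int.mod x 2 = x % 2 := PySem.Int.mod_eq_emod_of_pos (by norm_num)
theorem pv_div_two (x : Int) : PySem.Int.floordiv x 2 = x / 2 := PySem.Int.floordiv_eq_ediv_of_pos (by norm_num)

theorem pvLowBits_snoc_low (j : Nat) (x : Int) (h0 : 0 ≤ x) (h : x < 2 ^ j) :
    pvLowBits (j + 1) x = pvLowBits j x ++ [0] := by
  induction j generalizing x with
  | zero =>
    have : x = 0 := by omega
    subst this; simp [pvLowBits]
  | succ j ih =>
    have hd : PySem.Int.floordiv x 2 < 2 ^ j := by rw [pv_div_two]; omega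
    have hd0 : 0 ≤ PySem.Int.floordiv x 2 := by rw [pv_div_two]; omega
    calc pvLowBits (j + 1 + 1) x
        = PySem.Int.mod x 2 :: pvLowBits (j + 1) (PySem.Int.floordiv x 2) := rfl
      _ = PySem.Int.mod x 2 :: (pvLowBits j (PySem.Int.floordiv x 2) ++ [0]) := by rw [ih _ hd0 hd]
      _ = pvLowBits (j + 1) x ++ [0] := rfl

theorem pvLowBits_snoc_high (j : Nat) (x : Int) (h1 : 2 ^ j ≤ x) (h2 : x < 2 ^ (j + 1)) :
    pvLowBits (j + 1) x = pvLowBits j (x - 2 ^ j) ++ [1] := by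
  induction j generalizing x with
  | zero =>
    have : x = 1 := by omega
    subst this; simp [pvLowBits]
  | succ j ih =>
    have e1 : PySem.Int.floordiv x 2 - 2 ^ j = PySem.Int.floordiv (x - 2 ^ (j + 1)) 2 := by
      rw [pv_div_two, pv_div_two]; omega
    have e2 : PySem.Int.mod x 2 = PySem.Int.mod (x - 2 ^ (j + 1)) 2 := by
      rw [pv_mod_two, pv_mod_two]; omega
    have hb1 : 2 ^ j ≤ PySem.Int.floordiv x 2 := by rw [pv_div_two]; omega
    have hb2 : PySem.Int.floordiv x 2 < 2 ^ (j + 1) := by rw [pv_div_two]; omega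
    calc pvLowBits (j + 1 + 1) x
        = PySem.Int.mod x 2 :: pvLowBits (j + 1) (PySem.Int.floordiv x 2) := rfl
      _ = PySem.Int.mod x 2 :: (pvLowBits j (PySem.Int.floordiv x 2 - 2 ^ j) ++ [1]) := by rw [ih _ hb1 hb2]
      _ = PySem.Int.mod (x - 2 ^ (j + 1)) 2 :: (pvLowBits j (PySem.Int.floordiv (x - 2 ^ (j + 1)) 2) ++ [1]) := by rw [e1, e2]
      _ = pvLowBits (j + 1) (x - 2 ^ (j + 1)) ++ [1] := rfl

theorem pv_set_mid (pre rest : List Int) (j : Nat) (hj : j = pre.length) (x y : Int) :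
    PySem.List.pySetD (pre ++ x :: rest) (j : Int) y = pre ++ y :: rest := by
  subst hj
  rw [PySem.List.pySetD_natCast]
  simp

theorem pvGreedy (L : List Int) (mPow : Nat) (hlen : mPow ≤ L.length)
    (hL : ∀ t : Nat, t < mPow → PySem.List.pyGetD L (t : Int) 0 = 2 ^ t) :
    ∀ (j : Nat) (x : Int) (done : List Int), j ≤ mPow → 0 ≤ x → x < 2 ^ j →
      pvMapintLoop L x ((j : Int) - 1) (List.replicate j 0 ++ done) = pvLowBits j x ++ done := by
  intro j
  induction j with
  | zero =>
    intro x done _ h0 h1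
    have : x = 0 := by omega
    subst this
    rw [pvMapintLoop]
    simp [pvLowBits]
  | succ j ih =>
    intro x done hj h0 h1
    by_cases hx : 0 < x
    · have hin : PySem.Raise.InRange L.length (((j + 1 : Nat) : Int) - 1) := by
        constructor <;> push_cast <;> omega
      have hget : PySem.List.pyGetD L (((j + 1 : Nat) : Int) - 1) 0 = 2 ^ j := by
        have : ((j + 1 : Nat) : Int) - 1 = ((j : Nat) : Int) := by push_cast; omega
        rw [this, hL j (by omega)]
      have harr : (List.replicate (j + 1) (0 : Int) ++ done) = List.replicate j 0 ++ (0 :: done) := by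
        rw [List.replicate_succ']; simp
      rw [pvMapintLoop, if_pos hx, dif_pos hin, hget]
      by_cases hge : (2 : Int) ^ j ≤ x
      · rw [if_pos hge]
        have hset : PySem.List.pySetD (List.replicate (j + 1) (0 : Int) ++ done) (((j + 1 : Nat) : Int) - 1) 1
            = List.replicate j 0 ++ (1 :: done) := by
          rw [harr]
          have : ((j + 1 : Nat) : Int) - 1 = ((j : Nat) : Int) := by push_cast; omega
          rw [this, pv_set_mid _ _ j (by simp)]
        have hk1 : ((j + 1 : Nat) : Int) - 1 - 1 = ((j : Nat) : Int) - 1 := by push_cast; omega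
        rw [hset, hk1, ih (x - 2 ^ j) (1 :: done) (by omega) (by omega) (by omega),
            pvLowBits_snoc_high j x hge h1]
        simp
      · rw [if_neg hge]
        have hk1 : ((j + 1 : Nat) : Int) - 1 - 1 = ((j : Nat) : Int) - 1 := by push_cast; omega
        rw [harr, hk1, ih x (0 :: done) (by omega) (by omega) (by omega),
            pvLowBits_snoc_low j x h0 (by omega)]
        simp
    · have : x = 0 := by omega
      subst this
      rw [pvMapintLoop]
      simp [pvLowBits_zero]

theorem pvBmapLoop_eq (j : Nat) (v : Int) (h1 : 2 ^ j ≤ v) (h2 : v < 2 ^ (j + 1)) :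
    ∀ (d k : Nat) (acc : List Int), k + d = j →
      pvBmapLoop (v - (2 ^ k - 1)) k acc
        = acc ++ (List.range' k d).map (fun t => (2 : Int) ^ t) ++ [v - (2 ^ j - 1)] := by
  intro d
  induction d with
  | zero =>
    intro k acc hk
    have hkj : k = j := by omega
    subst hkj
    rw [pvBmapLoop, dif_neg (by omega)]
    simp
  | succ d ih =>
    intro k acc hk
    have hcond : (2 : Int) ^ k < v - (2 ^ k - 1) := by
      have : (2 : Int) ^ (k + 1) ≤ 2 ^ j := pow_le_pow_right₀ (by norm_num) (by omega)
      have hp : (2 : Int) ^ (k + 1) = 2 ^ k * 2 := by ring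
      omega
    rw [pvBmapLoop, dif_pos hcond]
    have e : v - (2 ^ k - 1) - 2 ^ k = v - (2 ^ (k + 1) - 1) := by
      have hp : (2 : Int) ^ (k + 1) = 2 ^ k * 2 := by ring
      omega
    rw [e, ih (k + 1) (acc ++ [2 ^ k]) (by omega)]
    rw [List.range'_succ]
    simp

theorem pvBmap_eq (j : Nat) (v : Int) (h1 : 2 ^ j ≤ v) (h2 : v < 2 ^ (j + 1)) :
    pvBmap v = (List.range j).map (fun t => (2 : Int) ^ t) ++ [v - (2 ^ j - 1)] := by
  have h0 : v - (2 ^ 0 - 1) = v := by norm_num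
  have := pvBmapLoop_eq j v h1 h2 j 0 [] (by omega)
  rw [h0] at this
  rw [pvBmap, this, List.range_eq_range']
  simp

theorem pv_bitLength_pos (v : Int) (hv : 1 ≤ v) : 1 ≤ PySem.Int.bitLength v := by
  by_contra h
  have h0 : PySem.Int.bitLength v = 0 := by omega
  have := PySem.Int.lt_two_pow_bitLength v
  rw [h0] at this
  simp at this
  omega

theorem pv_pow_bounds (v : Int) (hv : 1 ≤ v) :
    (2 : Int) ^ (PySem.Int.bitLength v - 1) ≤ v ∧ v < 2 ^ (PySem.Int.bitLength v - 1 + 1) := by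
  have hne : v ≠ 0 := by omega
  have hlo := PySem.Int.two_pow_bitLength_le v hne
  have hhi := PySem.Int.lt_two_pow_bitLength v
  have hbl := pv_bitLength_pos v hv
  have he : PySem.Int.bitLength v - 1 + 1 = PySem.Int.bitLength v := by omega
  have habs : (v.natAbs : Int) = v := Int.natAbs_of_nonneg (by omega)
  constructor
  · calc (2 : Int) ^ (PySem.Int.bitLength v - 1) = ((2 ^ (PySem.Int.bitLength v - 1) : Nat) : Int) := by push_cast; ring
      _ ≤ (v.natAbs : Int) := by exact_mod_cast hlo
      _ = v := habs
  · rw [he]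
    calc v = (v.natAbs : Int) := habs.symm
      _ < ((2 ^ PySem.Int.bitLength v : Nat) : Int) := by exact_mod_cast hhi
      _ = 2 ^ PySem.Int.bitLength v := by push_cast; ring

theorem pv_length_lowBits (m : Nat) (x : Int) : (pvLowBits m x).length = m := by
  induction m generalizing x with
  | zero => rfl
  | succ m ih => simp [pvLowBits, ih]

theorem pv_length_encode (v x : Int) (hv : 1 ≤ v) : (pvEncode v x).length = PySem.Int.bitLength v := by
  have h1 := pv_bitLength_pos v hv
  rw [pvEncode]
  simp [pv_length_lowBits]
  omega

theorem pvMapint_eq_encode (v x : Int) (hv : 1 ≤ v) (h0 : 0 ≤ x) (hxv : x ≤ v) :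
    pvMapint (pvBmap v) x = pvEncode v x := by
  have hb := pv_pow_bounds v hv
  set m : Nat := PySem.Int.bitLength v - 1 with hm
  have hbm := pvBmap_eq m v hb.1 hb.2
  have hr1 : 1 ≤ v - (2 ^ m - 1) := by omega
  have hr2 : v - (2 ^ m - 1) ≤ 2 ^ m := by
    have : (2:Int) ^ (m+1) = 2 ^ m * 2 := by ring
    omega
  have hlenP : ((List.range m).map (fun t => (2 : Int) ^ t)).length = m := by simp
  have hlen : (pvBmap v).length = m + 1 := by rw [hbm]; simp
  have hget : ∀ t : Nat, t < m → PySem.List.pyGetD (pvBmap v) (t : Int) 0 = 2 ^ t := by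
    intro t ht
    rw [hbm, PySem.List.pyGetD_natCast]
    rw [List.getD_append _ _ _ _ (by simpa using ht)]
    simp [List.getD, ht]
  by_cases hx0 : x = 0
  · subst hx0
    have htop : ¬ (v - (2 ^ m - 1) ≤ 0) := by omega
    rw [pvMapint, if_pos rfl, hlen, pvEncode]
    simp only [← hm, if_neg htop]
    rw [pvLowBits_zero, List.replicate_succ']
  · rw [pvMapint, if_neg hx0, hlen]
    have hk : ((m + 1 : Nat) : Int) - 1 = ((m : Nat) : Int) := by push_cast; omega
    have hgetr : PySem.List.pyGetD (pvBmap v) ((m : Nat) : Int) 0 = v - (2 ^ m - 1) := by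
      rw [hbm, PySem.List.pyGetD_natCast]
      have : (List.map (fun t => (2:Int) ^ t) (List.range m)).length = m := hlenP
      simp [List.getD_eq_getElem?_getD, this]
    have hin : PySem.Raise.InRange (pvBmap v).length ((m : Nat) : Int) := by
      rw [hlen]; constructor <;> push_cast <;> omega
    have harr : List.replicate (m + 1) (0 : Int) = List.replicate m 0 ++ [0] := List.replicate_succ'
    rw [pvMapintLoop, if_pos (by omega), hk, dif_pos hin, hgetr]
    by_cases hge : v - (2 ^ m - 1) ≤ x
    · rw [if_pos hge]
      have hset : PySem.List.pySetD (List.replicate (m + 1) (0:Int)) ((m : Nat) : Int) 1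
          = List.replicate m 0 ++ [1] := by
        rw [harr]
        exact pv_set_mid _ _ m (by simp) 0 1
      rw [hset]
      have := pvGreedy (pvBmap v) m (by omega) hget m (x - (v - (2 ^ m - 1))) [1] (le_refl m) (by omega) (by omega)
      rw [this, pvEncode]
      simp only [← hm, if_pos hge]
    · rw [if_neg hge, harr]
      have := pvGreedy (pvBmap v) m (by omega) hget m x [0] (le_refl m) h0 (by omega)
      rw [this, pvEncode]
      simp only [← hm, if_neg hge]

theorem pvWriteBits_eq (bi : List Int) : ∀ (done : List Int) (R : Nat), bi.length ≤ R →
    pvWriteBits ((done.length : Int), done ++ List.replicate R 0) bi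
      = (((done ++ bi).length : Int), (done ++ bi) ++ List.replicate (R - bi.length) 0) := by
  induction bi with
  | nil => intro done R _; simp [pvWriteBits]
  | cons b bi ih =>
    intro done R hR
    have hR1 : 1 ≤ R := by simpa using Nat.le_trans (by simp) hR
    have hrep : List.replicate R (0 : Int) = 0 :: List.replicate (R - 1) 0 := by
      cases R with
      | zero => omega
      | succ R => simp [List.replicate_succ]
    have hset : PySem.List.pySetD (done ++ List.replicate R (0:Int)) ((done.length : Int)) b
        = (done ++ [b]) ++ List.replicate (R - 1) 0 := by
      rw [hrep, pv_set_mid _ _ done.length rfl]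
      simp
    have hstep : pvWriteBits ((done.length : Int), done ++ List.replicate R 0) (b :: bi)
        = pvWriteBits (((done.length : Int) + 1), (done ++ [b]) ++ List.replicate (R - 1) 0) bi := by
      rw [pvWriteBits, List.foldl_cons, hset]; rfl
    have hlen1 : ((done ++ [b]).length : Int) = (done.length : Int) + 1 := by simp
    rw [hstep, ← hlen1, ih (done ++ [b]) (R - 1) (by simp at hR ⊢; omega)]
    simp; omega

theorem pvOuter (vfun xfun : Int → Int) (skip : Int → Bool)
    (is : List Int)
    (hok : ∀ i ∈ is, skip i = false → 1 ≤ vfun i ∧ 0 ≤ xfun i ∧ xfun i ≤ vfun i) :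
    ∀ (done : List Int) (R : Nat),
    R = (is.map (fun i => if skip i then 0 else PySem.Int.bitLength (vfun i))).sum →
    (is.foldl (fun st i => if skip i then st else pvWriteBits st (pvMapint (pvBmap (vfun i)) (xfun i)))
        ((done.length : Int), done ++ List.replicate R 0)).2
      = is.foldl (fun out i => if skip i then out else out ++ pvEncode (vfun i) (xfun i)) done := by
  induction is with
  | nil => intro done R hR; simp at hR; simp [hR]
  | cons i is ih =>
    intro done R hR
    have hok' := hok i (by simp)
    have hoktl : ∀ j ∈ is, skip j = false → 1 ≤ vfun j ∧ 0 ≤ xfun j ∧ xfun j ≤ vfun j := by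
      intro j hj; exact hok j (by simp [hj])
    by_cases hs : skip i
    · simp only [List.foldl_cons, if_pos hs]
      exact ih hoktl done R (by simpa [hs] using hR)
    · simp only [List.foldl_cons, if_neg hs]
      obtain ⟨h1, h2, h3⟩ := hok' (by simp [hs])
      have henc := pvMapint_eq_encode (vfun i) (xfun i) h1 h2 h3
      have hlenc : (pvEncode (vfun i) (xfun i)).length = PySem.Int.bitLength (vfun i) :=
        pv_length_encode _ _ h1
      have hRsum : R = PySem.Int.bitLength (vfun i)
          + (is.map (fun j => if skip j then 0 else PySem.Int.bitLength (vfun j))).sum := by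
        simpa [hs] using hR
      have hle : (pvEncode (vfun i) (xfun i)).length ≤ R := by omega
      rw [henc, pvWriteBits_eq _ done R hle]
      exact ih hoktl (done ++ pvEncode (vfun i) (xfun i)) _ (by omega)

theorem pvSetFold (g : Int → Int) : ∀ (d : Nat) (a : Int) (pre : List Int), 0 ≤ a → (pre.length : Int) = a →
    (PySem.List.pyRange a (a + d) 1).foldl (fun bs i => PySem.List.pySetD bs i (g i)) (pre ++ List.replicate d 0)
      = pre ++ (PySem.List.pyRange a (a + d) 1).map g := by
  intro d
  induction d with
  | zero =>
    intro a pre _ _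
    rw [PySem.List.pyRange_one_eq_nil (by omega)]
    simp
  | succ d ih =>
    intro a pre ha hlen
    rw [PySem.List.pyRange_one_cons (by omega)]
    have hrep : List.replicate (d + 1) (0 : Int) = 0 :: List.replicate d 0 := by
      simp [List.replicate_succ]
    have hset : PySem.List.pySetD (pre ++ List.replicate (d+1) (0:Int)) a (g a)
        = (pre ++ [g a]) ++ List.replicate d 0 := by
      rw [hrep, ← hlen, pv_set_mid _ _ pre.length rfl]
      simp
    have he : a + ((d + 1 : Nat) : Int) = (a + 1) + (d : Int) := by push_cast; ring
    simp only [List.foldl_cons, List.map_cons, hset]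
    rw [he, ih (a + 1) (pre ++ [g a]) (by omega) (by simp; omega)]
    simp

theorem pv_getD_shifted (g : Int → Int) (n i : Int) (h1 : 1 ≤ i) (h2 : i < n) :
    PySem.List.pyGetD ((0:Int) :: (PySem.List.pyRange 1 n 1).map g) i 0 = g i := by
  rw [PySem.List.pyGetD_of_nonneg _ _ (by omega : (0:Int) ≤ i)]
  have hi : i.toNat = (i - 1).toNat + 1 := by omega
  rw [hi]
  simp only [List.getD_cons_succ]
  rw [PySem.List.pyRange_one, List.map_map]
  have hlt : (i - 1).toNat < (n - 1).toNat := by omega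
  rw [List.getD_eq_getElem _ _ (by simpa using hlt)]
  simp
  congr 1
  omega

theorem pv_sum_cast (is : List Int) (c : Int → Nat) :
    (is.map (fun i => ((c i : Nat) : Int))).sum = ((is.map c).sum : Int) := by
  induction is with
  | nil => simp
  | cons a t ih => simp [ih]

theorem pv_g_flog (v : Int) (h1 : 1 ≤ v) : pvFlog2 v + 1 = ((PySem.Int.bitLength v : Nat) : Int) := by
  have := pv_bitLength_pos v h1
  rw [pvFlog2]
  omega

theorem pvAssemble (n : Int) (vfun xfun : Int → Int) (skip : Int → Bool) (g : Int → Int)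
    (hg : ∀ i ∈ PySem.List.pyRange 1 n 1, g i = if skip i then 0 else ((PySem.Int.bitLength (vfun i) : Nat) : Int))
    (hok : ∀ i ∈ PySem.List.pyRange 1 n 1, skip i = false → 1 ≤ vfun i ∧ 0 ≤ xfun i ∧ xfun i ≤ vfun i)
    (sizes : List Int) (hsz : sizes = (0 : Int) :: (PySem.List.pyRange 1 n 1).map g) :
    ((PySem.List.pyRange 1 n 1).foldl
        (fun st i => if skip i then st else pvWriteBits st (pvMapint (pvBmap (vfun i)) (xfun i)))
        ((0 : Int), List.replicate sizes.sum.toNat 0)).2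
      = (PySem.List.pyRange 1 n 1).foldl
        (fun out i => if skip i then out else out ++ pvEncode (vfun i) (xfun i)) [] := by
  set is := PySem.List.pyRange 1 n 1 with his
  have hmap : is.map g = is.map (fun i => (((if skip i then 0 else PySem.Int.bitLength (vfun i)) : Nat) : Int)) := by
    apply List.map_congr_left
    intro i hi
    rw [hg i hi]
    by_cases hs : skip i <;> simp [hs]
  have hsum : sizes.sum = (((is.map (fun i => if skip i then 0 else PySem.Int.bitLength (vfun i))).sum : Nat) : Int) := by
    rw [hsz, List.sum_cons, hmap, pv_sum_cast is (fun i => if skip i then 0 else PySem.Int.bitLength (vfun i))]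
    ring
  have hR : sizes.sum.toNat = (is.map (fun i => if skip i then 0 else PySem.Int.bitLength (vfun i))).sum := by
    rw [hsum]; exact Int.toNat_natCast _
  have key := pvOuter vfun xfun skip is hok [] sizes.sum.toNat hR
  simpa using key

-- ===== VERDICT (by name: the statement is the Claim_ definition above) =====
theorem intvars_to_binary_spec : Claim_equal_intvars_to_binary := by
  intro array C latest n earliest var hDom hPre
  unfold Spec_intvars_to_binary
  by_cases hn : n ≤ 1
  · rw [intvars_to_binary, intvars_to_binary_alt, PySem.List.pyRange_one_eq_nil (by omega)]
    simp [pvSizesA, PySem.List.pyRange_one_eq_nil (by omega), List.sum_replicate]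
  · have hn2 : 2 ≤ n := by omega
    rcases hPre with h | h
    · omega
    rw [intvars_to_binary, intvars_to_binary_alt]
    rcases h with ⟨hv, hl, he, ha, hok⟩ | ⟨hv, he, hc, hcl, hok⟩ | ⟨hv, hl, ha, hok⟩ | ⟨hv, hl, ha, hc, hcl, hok⟩
    all_goals subst hv
    -- shared pieces
    all_goals
      have hrepl : List.replicate n.toNat (0:Int) = [0] ++ List.replicate (n-1).toNat 0 := by
        have he1 : n.toNat = (n-1).toNat + 1 := by omega
        rw [he1, List.replicate_succ]; rfl
      have hend : (1 : Int) + (((n-1).toNat : Nat) : Int) = n := by omega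
    · -- service
      set vfun : Int → Int := fun i => PySem.List.pyGetD latest i 0 - PySem.List.pyGetD earliest i 0 with hvf
      set g : Int → Int := fun i => pvFlog2 (vfun i) + 1 with hgdef
      have hsz : pvSizesA C latest n earliest "service" = (0 : Int) :: (PySem.List.pyRange 1 n 1).map g := by
        rw [pvSizesA]
        have hfold := pvSetFold g (n-1).toNat 1 [0] (by norm_num) (by simp)
        rw [hend] at hfold
        rw [hrepl]
        rw [PySem.List.foldl_congr_mem _ _ (fun bs i => PySem.List.pySetD bs i (g i)) _ (by intro acc i _; simp [hgdef, hvf])]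
        simpa using hfold
      rw [hsz]
      have hA := pvAssemble n vfun (fun i => PySem.List.pyGetD array i 0) (fun _ => false) g
        (by intro i hi
            have := pv_g_flog (vfun i) (hok i hi).1
            simpa [hgdef] using this)
        (by intro i hi _; exact hok i hi)
        ((0 : Int) :: (PySem.List.pyRange 1 n 1).map g) rfl
      rw [PySem.List.foldl_congr_mem _ _
            (fun st i => if (fun (_ : Int) => false) i then st else pvWriteBits st (pvMapint (pvBmap (vfun i)) (PySem.List.pyGetD array i 0))) _
            (by intro acc i _; simp [hvf])]
      rw [hA]
      apply PySem.List.foldl_congr_mem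
      intro acc i _
      simp [hvf]
    · -- wait
      set vfun : Int → Int := fun i => PySem.List.pyGetD earliest i 0 - PySem.List.pyGetD (PySem.List.pyGetD C 0 []) i 0 with hvf
      set skip : Int → Bool := fun i => decide (vfun i ≤ 0) with hskdef
      set g : Int → Int := fun i => if 0 < vfun i then pvFlog2 (vfun i) + 1 else 0 with hgdef
      have hsz : pvSizesA C latest n earliest "wait" = (0 : Int) :: (PySem.List.pyRange 1 n 1).map g := by
        rw [pvSizesA]
        have hfold := pvSetFold g (n-1).toNat 1 [0] (by norm_num) (by simp)
        rw [hend] at hfold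
        rw [hrepl]
        rw [PySem.List.foldl_congr_mem _ _ (fun bs i => PySem.List.pySetD bs i (g i)) _
              (by intro acc i _
                  simp only [hgdef, hvf, sub_pos, String.reduceEq, reduceIte]
                  split_ifs <;> rfl)]
        simpa using hfold
      rw [hsz]
      have hgnz : ∀ i ∈ PySem.List.pyRange 1 n 1, (g i ≠ 0 ↔ skip i = false) := by
        intro i hi
        simp only [hgdef, hskdef, hvf, decide_eq_false_iff_not, not_le]
        by_cases h0 : 0 < PySem.List.pyGetD earliest i 0 - PySem.List.pyGetD (PySem.List.pyGetD C 0 []) i 0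
        · have hbl := pv_bitLength_pos _ (by omega : (1:Int) ≤ PySem.List.pyGetD earliest i 0 - PySem.List.pyGetD (PySem.List.pyGetD C 0 []) i 0)
          simp only [if_pos h0, pvFlog2]
          constructor
          · intro _; exact h0
          · intro _; omega
        · have hlt2 : ¬ (PySem.List.pyGetD (PySem.List.pyGetD C 0 []) i 0 < PySem.List.pyGetD earliest i 0) := by omega
          simp [hlt2]
      have hA := pvAssemble n vfun (fun i => PySem.List.pyGetD array i 0) skip g
        (by intro i hi
            simp only [hgdef, hskdef, hvf]
            by_cases h0 : 0 < PySem.List.pyGetD earliest i 0 - PySem.List.pyGetD (PySem.List.pyGetD C 0 []) i 0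
            · have h1 : (1:Int) ≤ PySem.List.pyGetD earliest i 0 - PySem.List.pyGetD (PySem.List.pyGetD C 0 []) i 0 := by omega
              have hbl := pv_bitLength_pos _ h1
              simp only [if_pos h0, pvFlog2]
              rw [if_neg (by simpa using h0)]
              omega
            · have hle2 : PySem.List.pyGetD earliest i 0 - PySem.List.pyGetD (PySem.List.pyGetD C 0 []) i 0 ≤ 0 := by omega
              have hlt2 : ¬ (PySem.List.pyGetD (PySem.List.pyGetD C 0 []) i 0 < PySem.List.pyGetD earliest i 0) := by omega
              simp [hle2, hlt2])
        (by intro i hi hs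
            simp only [hskdef, hvf, decide_eq_false_iff_not, not_le] at hs
            exact ((hok i hi) (by simpa [hvf] using hs)).2)
        ((0 : Int) :: (PySem.List.pyRange 1 n 1).map g) rfl
      rw [PySem.List.foldl_congr_mem _ _
            (fun st i => if skip i then st else pvWriteBits st (pvMapint (pvBmap (vfun i)) (PySem.List.pyGetD array i 0))) _
            (by intro acc i hi
                simp only [String.reduceEq, reduceIte]
                have hget := pv_getD_shifted g n i ((PySem.List.mem_pyRange_one.mp hi).1) ((PySem.List.mem_pyRange_one.mp hi).2)
                have hiff := hgnz i hi
                simp only [hvf]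
                by_cases hs : skip i
                · rw [if_pos hs]
                  have : ¬ (PySem.List.pyGetD ((0:Int) :: (PySem.List.pyRange 1 n 1).map g) i 0 ≠ 0) := by
                    rw [hget]
                    simp only [ne_eq, not_not]
                    by_contra hne
                    have := hiff.mp hne
                    rw [hs] at this; simp at this
                  rw [if_neg this]
                · rw [if_neg hs]
                  have hsf : skip i = false := by simpa using hs
                  have : PySem.List.pyGetD ((0:Int) :: (PySem.List.pyRange 1 n 1).map g) i 0 ≠ 0 := by
                    rw [hget]
                    intro hz
                    have := hiff
                    simp only [hgdef, hvf] at hz ⊢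
                    have hle : ¬ (0 < PySem.List.pyGetD earliest i 0 - PySem.List.pyGetD (PySem.List.pyGetD C 0 []) i 0) := by
                      intro h0
                      rw [if_pos h0, pvFlog2] at hz
                      have hbl := pv_bitLength_pos _ (by omega : (1:Int) ≤ PySem.List.pyGetD earliest i 0 - PySem.List.pyGetD (PySem.List.pyGetD C 0 []) i 0)
                      omega
                    simp only [hskdef, hvf] at hsf
                    rw [decide_eq_false_iff_not] at hsf
                    omega
                  rw [if_pos this])]
      rw [hA]
      apply PySem.List.foldl_congr_mem
      intro acc i _
      simp only [hskdef, hvf]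
      by_cases h0 : PySem.List.pyGetD earliest i 0 - PySem.List.pyGetD (PySem.List.pyGetD C 0 []) i 0 ≤ 0
      · simp [h0]
      · simp [h0]
    · -- eq24
      set vfun : Int → Int := fun i => PySem.List.pyGetD latest i 0 with hvf
      set g : Int → Int := fun i => pvFlog2 (vfun i) + 1 with hgdef
      have hsz : pvSizesA C latest n earliest "eq24" = (0 : Int) :: (PySem.List.pyRange 1 n 1).map g := by
        rw [pvSizesA]
        have hfold := pvSetFold g (n-1).toNat 1 [0] (by norm_num) (by simp)
        rw [hend] at hfold
        rw [hrepl]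
        rw [PySem.List.foldl_congr_mem _ _ (fun bs i => PySem.List.pySetD bs i (g i)) _ (by intro acc i _; simp [hgdef, hvf])]
        simpa using hfold
      rw [hsz]
      have hA := pvAssemble n vfun (fun i => PySem.List.pyGetD array i 0) (fun _ => false) g
        (by intro i hi
            have := pv_g_flog (vfun i) (hok i hi).1
            simpa [hgdef] using this)
        (by intro i hi _; exact hok i hi)
        ((0 : Int) :: (PySem.List.pyRange 1 n 1).map g) rfl
      rw [PySem.List.foldl_congr_mem _ _
            (fun st i => if (fun (_ : Int) => false) i then st else pvWriteBits st (pvMapint (pvBmap (vfun i)) (PySem.List.pyGetD array i 0))) _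
            (by intro acc i _; simp [hvf])]
      rw [hA]
      apply PySem.List.foldl_congr_mem
      intro acc i _
      simp [hvf]
    · -- eq25
      set vfun : Int → Int := fun i => PySem.List.pyGetD latest i 0 - PySem.List.pyGetD (PySem.List.pyGetD C 0 []) i 0 with hvf
      set g : Int → Int := fun i => pvFlog2 (vfun i) + 1 with hgdef
      have hsz : pvSizesA C latest n earliest "eq25" = (0 : Int) :: (PySem.List.pyRange 1 n 1).map g := by
        rw [pvSizesA]
        have hfold := pvSetFold g (n-1).toNat 1 [0] (by norm_num) (by simp)
        rw [hend] at hfold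
        rw [hrepl]
        rw [PySem.List.foldl_congr_mem _ _ (fun bs i => PySem.List.pySetD bs i (g i)) _ (by intro acc i _; simp [hgdef, hvf])]
        simpa using hfold
      rw [hsz]
      have hA := pvAssemble n vfun (fun i => PySem.List.pyGetD array i 0) (fun _ => false) g
        (by intro i hi
            have := pv_g_flog (vfun i) (hok i hi).1
            simpa [hgdef] using this)
        (by intro i hi _; exact hok i hi)
        ((0 : Int) :: (PySem.List.pyRange 1 n 1).map g) rfl
      rw [PySem.List.foldl_congr_mem _ _
            (fun st i => if (fun (_ : Int) => false) i then st else pvWriteBits st (pvMapint (pvBmap (vfun i)) (PySem.List.pyGetD array i 0))) _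
            (by intro acc i _; simp [hvf])]
      rw [hA]
      apply PySem.List.foldl_congr_mem
      intro acc i _
      simp [hvf]
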